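-- pv_equiv track=rewrite | github.com/KXF980915/automation | common/request_encapsulation.py | _parse_jsonpath_components
-- ===== SOURCE A (Python) =====
-- def _parse_jsonpath_components(path: str) -> list:
--     """解析 JSONPath 表达式为组件列表"""
--     components = []
--     i = 0
--     length = len(path)
--
--     while i < length:
--         char = path[i]
--
--         if char == '.':
--             i += 1
--             if i >= length:
--                 break
--
--             # 检查下一个字符是否是 [
--             if path[i] == '[':
--                 # 处理 .[ 的情况，跳过 . 直接处理 [
--                 continue
--             else:
--                 # 处理 .key 的情况
--                 start = i
--                 while i < length and path[i] not in ['[', '.']: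
--                     i += 1
--                 if start < i:
--                     components.append(path[start:i])
--
--         elif char == '[':
--             # 找到匹配的 ]
--             bracket_end = path.find(']', i)
--             if bracket_end == -1:
--                 raise ValueError(f"Unclosed bracket in path: {path}")
--
--             components.append(path[i:bracket_end + 1])  # 包括方括号
--             i = bracket_end + 1
--
--         else:
--             # 处理开头的键（没有 . 前缀）
--             start = i
--             while i < length and path[i] not in ['[', '.']:
--                 i += 1
--             if start < i:
--                 components.append(path[start:i])
--
--     return components
-- ===== SOURCE B (Python) =====
-- def _parse_jsonpath_components(path: str) -> list:
--     """Single-pass character state machine: accumulate a key buffer, switch into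
--     bracket mode on '[', flush on '.'/'['/end; raises on an unclosed bracket."""
--     components = []
--     buf = []
--     in_bracket = False
--     for ch in path:
--         if in_bracket:
--             buf.append(ch)
--             if ch == ']':
--                 components.append(''.join(buf))
--                 buf = []
--                 in_bracket = False
--         elif ch == '[':
--             if buf:
--                 components.append(''.join(buf))
--             buf = ['[']
--             in_bracket = True
--         elif ch == '.':
--             if buf:
--                 components.append(''.join(buf))
--             buf = []
--         else:
--             buf.append(ch)
--     if in_bracket:
--         raise ValueError(f"Unclosed bracket in path: {path}")
--     if buf:
--         components.append(''.join(buf))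
--     return components
-- ===== Notes on version B (the rewrite author's own statement) =====
-- stated objective: alternative
-- what changed: Replaced A's index-based scanner with nested while loops and str.find by a single forward pass over the characters driven by a two-state (key/bracket) state machine with an accumulating buffer; both raise ValueError on an unclosed bracket, which Pre_ excludes.
import Mathlib
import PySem

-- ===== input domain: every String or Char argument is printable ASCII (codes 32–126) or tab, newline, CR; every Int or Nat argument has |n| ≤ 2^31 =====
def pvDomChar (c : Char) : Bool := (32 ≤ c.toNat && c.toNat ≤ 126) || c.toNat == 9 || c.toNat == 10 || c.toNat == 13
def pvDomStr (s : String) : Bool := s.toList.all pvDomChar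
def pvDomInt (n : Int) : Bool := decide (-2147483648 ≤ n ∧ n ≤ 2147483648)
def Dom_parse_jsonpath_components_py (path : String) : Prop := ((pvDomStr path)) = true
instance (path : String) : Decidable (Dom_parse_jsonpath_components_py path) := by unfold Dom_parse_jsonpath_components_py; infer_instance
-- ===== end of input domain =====

-- B replaces A's index scanner (nested while loops + str.find) by a one-pass two-state
-- (key/bracket) state machine over the characters; same cost, different structure.

-- ===== PORT A =====
-- inner loop `while i < length and path[i] not in ['[', '.']` as a span helper
def pvSpanKey : List Char → List Char × List Char
  | [] => ([], [])
  | c :: rest =>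
    if c = '[' ∨ c = '.' then ([], c :: rest)
    else
      let p := pvSpanKey rest
      (c :: p.1, p.2)

-- `path.find(']', i)`: the segment up to and including the first ']' plus the remainder
def pvFindClose : List Char → Option (List Char × List Char)
  | [] => none
  | c :: rest =>
    if c = ']' then some ([c], rest)
    else
      match pvFindClose rest with
      | none => none
      | some (a, b) => some (c :: a, b)

theorem pvSpanKey_snd_le : ∀ l : List Char, (pvSpanKey l).2.length ≤ l.length := by
  intro l
  induction l with
  | nil => simp [pvSpanKey]
  | cons c rest ih =>
    simp only [pvSpanKey]
    split
    · simp
    · simpa using Nat.le_succ_of_le ih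

theorem pvFindClose_lt : ∀ (l a : List Char) (b : List Char),
    pvFindClose l = some (a, b) → b.length < l.length := by
  intro l
  induction l with
  | nil => intro a b h; simp [pvFindClose] at h
  | cons c rest ih =>
    intro a b h
    simp only [pvFindClose] at h
    split at h
    · cases h; simp
    · cases hfc : pvFindClose rest with
      | none => rw [hfc] at h; cases h
      | some p =>
        rw [hfc] at h
        cases h
        have := ih p.1 p.2 (by rw [hfc])
        simpa using Nat.lt_succ_of_lt this

-- literal port of A's while loop, recursing on the remaining suffix (i ↦ the suffix from i)
def pvParseA : List Char → List String
  | [] => []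
  | c :: rest =>
    if c = '.' then
      match rest with
      | [] => []                            -- `if i >= length: break`
      | d :: rtail =>
        if d = '[' then pvParseA (d :: rtail)   -- `continue` at `.[`
        else
          let p := pvSpanKey (d :: rtail)
          (if p.1 ≠ [] then [String.mk p.1] else []) ++ pvParseA p.2
    else if c = '[' then
      match h : pvFindClose (c :: rest) with
      | none => []                          -- Python raises ValueError here; excluded by Pre_
      | some (tok, r) => String.mk tok :: pvParseA r
    else
      let p := pvSpanKey (c :: rest)
      (if p.1 ≠ [] then [String.mk p.1] else []) ++ pvParseA p.2
termination_by l => l.length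
decreasing_by
  · simp
  · have h2 := pvSpanKey_snd_le (d :: rtail); simp at h2 ⊢; omega
  · exact pvFindClose_lt _ _ _ h
  · rename_i hc1 hc2
    have h2 := pvSpanKey_snd_le rest
    simp only [pvSpanKey, List.length_cons]
    rw [if_neg (by simp [hc1, hc2])]
    simp
    omega

def parse_jsonpath_components_py (path : String) : List String :=
  pvParseA path.toList

-- ===== PORT B =====
-- one character step of the state machine: state = (components, current buffer, in_bracket)
def pvStepB (st : List String × List Char × Bool) (ch : Char) : List String × List Char × Bool :=
  match st with
  | (comps, buf, inb) =>
    if inb then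
      let buf' := buf ++ [ch]
      if ch = ']' then (comps ++ [String.mk buf'], [], false) else (comps, buf', true)
    else if ch = '[' then
      ((if buf ≠ [] then comps ++ [String.mk buf] else comps), ['['], true)
    else if ch = '.' then
      ((if buf ≠ [] then comps ++ [String.mk buf] else comps), [], false)
    else
      (comps, buf ++ [ch], false)

def pvFinishB (st : List String × List Char × Bool) : List String :=
  match st with
  | (comps, buf, inb) =>
    if inb then []                          -- Python raises ValueError here; excluded by Pre_
    else if buf ≠ [] then comps ++ [String.mk buf] else comps

def parse_jsonpath_components_py_alt (path : String) : List String :=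
  pvFinishB (path.toList.foldl pvStepB ([], [], false))

-- ===== PRECONDITION & SPEC =====
-- Pre_ excludes exactly the inputs with an unclosed bracket (a '[' with no ']' at or after
-- it), on which A raises ValueError (and B raises the same ValueError).
def Pre_parse_jsonpath_components_py (path : String) : Prop :=
  '[' ∉ path.toList.reverse.takeWhile (fun c => c != ']')
instance (path : String) : Decidable (Pre_parse_jsonpath_components_py path) := by
  unfold Pre_parse_jsonpath_components_py; infer_instance

def pvWitness_parse_jsonpath_components_py : String := "a.b[0].c"

def Spec_parse_jsonpath_components_py (path : String) (out : List String) : Prop := out = parse_jsonpath_components_py_alt path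
instance (path : String) (out : List String) : Decidable (Spec_parse_jsonpath_components_py path out) := by unfold Spec_parse_jsonpath_components_py; infer_instance

-- ===== CLAIM (what is proved, stated in full; the proofs are below) =====
def Claim_equal_parse_jsonpath_components_py : Prop := ∀ (path : String), Dom_parse_jsonpath_components_py path → Pre_parse_jsonpath_components_py path → Spec_parse_jsonpath_components_py path (parse_jsonpath_components_py path)

-- ===== LEMMAS AND PROOFS =====

-- "every '[' in l is eventually closed"
def pvNoOpen (l : List Char) : Prop := ∀ l₁ l₂ : List Char, l = l₁ ++ '[' :: l₂ → ']' ∈ l₂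

theorem pvNoOpen_suffix {x y : List Char} (h : pvNoOpen (x ++ y)) : pvNoOpen y := by
  intro l₁ l₂ e
  exact h (x ++ l₁) l₂ (by simp [e])

theorem pvPre_noOpen {l : List Char} (h : '[' ∉ l.reverse.takeWhile (fun c => c != ']')) :
    pvNoOpen l := by
  intro l₁ l₂ e
  by_contra hnr
  apply h
  have hrev : l.reverse = l₂.reverse ++ '[' :: l₁.reverse := by simp [e]
  rw [hrev]
  have hall : ∀ c ∈ l₂.reverse, (fun c => c != ']') c = true := by
    intro c hc
    simp only [bne_iff_ne, ne_eq]
    intro hcr; subst hcr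
    exact hnr (by simpa using hc)
  rw [List.takeWhile_append_of_pos hall]
  simp [List.takeWhile]

theorem pvSpanKey_append {b : List Char} (h : ∀ c ∈ b, c ≠ '[' ∧ c ≠ '.') (x : List Char) :
    pvSpanKey (b ++ x) = (b ++ (pvSpanKey x).1, (pvSpanKey x).2) := by
  induction b with
  | nil => simp
  | cons c t ih =>
    have hc := h c (by simp)
    simp only [List.cons_append, pvSpanKey]
    rw [if_neg (by tauto)]
    rw [ih (fun d hd => h d (by simp [hd]))]

theorem pvFindClose_append {t : List Char} (h : ']' ∉ t) (r : List Char) :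
    pvFindClose (t ++ ']' :: r) = some (t ++ [']'], r) := by
  induction t with
  | nil => simp [pvFindClose]
  | cons c tt ih =>
    simp only [List.cons_append, pvFindClose]
    rw [if_neg (by rintro rfl; exact h (by simp))]
    rw [ih (fun hm => h (by simp [hm]))]

-- unfolding lemmas for the three branches of pvParseA
theorem pvParseA_bracket {rest tok r : List Char}
    (hfc : pvFindClose ('[' :: rest) = some (tok, r)) :
    pvParseA ('[' :: rest) = String.mk tok :: pvParseA r := by
  rw [pvParseA.eq_def]
  simp only [reduceIte, if_neg (by decide : ¬('[' : Char) = '.')]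
  split
  · rename_i h; rw [hfc] at h; cases h
  · rename_i tok' r' h
    rw [hfc] at h
    simp only [Option.some.injEq, Prod.mk.injEq] at h
    obtain ⟨rfl, rfl⟩ := h
    rfl

theorem pvParseA_key {c : Char} (h1 : c ≠ '.') (h2 : c ≠ '[') (rest : List Char) :
    pvParseA (c :: rest) =
      (if (pvSpanKey (c :: rest)).1 ≠ [] then [String.mk (pvSpanKey (c :: rest)).1] else []) ++
        pvParseA (pvSpanKey (c :: rest)).2 := by
  rw [pvParseA.eq_def]
  simp [h1, h2]

theorem pvParseA_dot (l : List Char) : pvParseA ('.' :: l) = pvParseA l := by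
  cases l with
  | nil => simp [pvParseA]
  | cons d r =>
    by_cases hd : d = '['
    · subst hd; simp [pvParseA]
    · by_cases hdd : d = '.'
      · subst hdd
        rw [pvParseA.eq_def]
        simp [pvSpanKey]
      · rw [pvParseA.eq_def]
        rw [pvParseA_key hdd hd r]
        have : pvSpanKey (d :: r) = ((pvSpanKey (d :: r)).1, (pvSpanKey (d :: r)).2) := rfl
        simp [hd]

theorem pvParseA_keyrun {b : List Char} (hb : b ≠ []) (h : ∀ c ∈ b, c ≠ '[' ∧ c ≠ '.')
    (x : List Char) (hx : (pvSpanKey x).1 = []) :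
    pvParseA (b ++ x) = String.mk b :: pvParseA (pvSpanKey x).2 := by
  cases b with
  | nil => exact absurd rfl hb
  | cons c t =>
    have hc := h c (by simp)
    rw [List.cons_append, pvParseA_key hc.2 hc.1]
    have hspan : pvSpanKey (c :: (t ++ x)) = (c :: t, (pvSpanKey x).2) := by
      have := pvSpanKey_append (b := c :: t) h x
      simpa [hx] using this
    simp [hspan]

theorem pvSpanKey_stop {c : Char} (h : c = '[' ∨ c = '.') (l : List Char) :
    pvSpanKey (c :: l) = ([], c :: l) := by
  simp [pvSpanKey, h]

theorem pvMain : ∀ (l : List Char) (comps : List String) (buf : List Char) (inb : Bool),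
    (inb = false → ∀ c ∈ buf, c ≠ '[' ∧ c ≠ '.') →
    (inb = true → ∃ t, buf = '[' :: t ∧ ']' ∉ t) →
    pvNoOpen (buf ++ l) →
    pvFinishB (l.foldl pvStepB (comps, buf, inb)) = comps ++ pvParseA (buf ++ l) := by
  intro l
  induction l with
  | nil =>
    intro comps buf inb hk hb hp
    cases inb with
    | true =>
      obtain ⟨t, rfl, hT⟩ := hb rfl
      exact absurd (hp [] t (by simp)) hT
    | false =>
      simp only [List.foldl_nil, List.append_nil, pvFinishB]
      cases buf with
      | nil => simp [pvParseA]
      | cons c t =>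
        have hrun := pvParseA_keyrun (b := c :: t) (by simp) (hk rfl) [] (by simp [pvSpanKey])
        simp only [List.append_nil] at hrun
        simp [hrun, pvSpanKey, pvParseA]
  | cons ch l' ih =>
    intro comps buf inb hk hb hp
    rw [List.foldl_cons]
    cases inb with
    | true =>
      obtain ⟨t, rfl, hT⟩ := hb rfl
      by_cases hch : ch = ']'
      · subst hch
        have hstep : pvStepB (comps, '[' :: t, true) ']' =
            (comps ++ [String.mk ('[' :: t ++ [']'])], [], false) := by
          simp [pvStepB]
        rw [hstep]
        have hsuffix : pvNoOpen l' := by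
          have he : ('[' :: t) ++ ']' :: l' = (('[' :: t) ++ [']']) ++ l' := by simp
          exact pvNoOpen_suffix (x := ('[' :: t) ++ [']']) (by rw [← he]; exact hp)
        rw [ih _ [] false (by intro _ c hc; simp at hc) (by intro hf; cases hf)
          (by simpa using hsuffix)]
        have hfc : pvFindClose ('[' :: (t ++ ']' :: l')) = some ('[' :: t ++ [']'], l') := by
          have hni : ']' ∉ '[' :: t := by simp [hT]
          have := pvFindClose_append hni l'
          simpa using this
        simp only [List.cons_append] at hfc ⊢
        rw [pvParseA_bracket hfc]
        simp
      · have hstep : pvStepB (comps, '[' :: t, true) ch = (comps, '[' :: t ++ [ch], true) := by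
          simp [pvStepB, hch]
        rw [hstep]
        have heq : ('[' :: t ++ [ch]) ++ l' = ('[' :: t) ++ ch :: l' := by simp
        rw [ih _ _ true (by intro hf; cases hf)
          (by intro _
              refine ⟨t ++ [ch], by simp, ?_⟩
              intro hm
              rcases List.mem_append.mp hm with hmm | hmm
              · exact hT hmm
              · simp at hmm; exact hch hmm.symm)
          (by rw [heq]; exact hp)]
        rw [heq]
    | false =>
      by_cases hbr : ch = '['
      · subst hbr
        have hstep : pvStepB (comps, buf, false) '[' =
            ((if buf ≠ [] then comps ++ [String.mk buf] else comps), ['['], true) := by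
          simp [pvStepB]
        rw [hstep]
        have hsuffix : pvNoOpen ('[' :: l') := pvNoOpen_suffix (x := buf) hp
        rw [ih _ ['['] true (by intro hf; cases hf) (by intro _; exact ⟨[], rfl, by simp⟩)
          (by simpa using hsuffix)]
        cases buf with
        | nil => simp
        | cons c t =>
          rw [pvParseA_keyrun (b := c :: t) (by simp) (hk rfl) ('[' :: l')
            (by rw [pvSpanKey_stop (Or.inl rfl)])]
          rw [pvSpanKey_stop (Or.inl rfl)]
          simp
      · by_cases hdot : ch = '.'
        · subst hdot
          have hstep : pvStepB (comps, buf, false) '.' =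
              ((if buf ≠ [] then comps ++ [String.mk buf] else comps), [], false) := by
            simp [pvStepB]
          rw [hstep]
          have hsuffix : pvNoOpen l' := by
            have he : buf ++ '.' :: l' = (buf ++ ['.']) ++ l' := by simp
            exact pvNoOpen_suffix (x := buf ++ ['.']) (by rw [← he]; exact hp)
          rw [ih _ [] false (by intro _ c hc; simp at hc) (by intro hf; cases hf)
            (by simpa using hsuffix)]
          cases buf with
          | nil => simp [pvParseA_dot]
          | cons c t =>
            rw [pvParseA_keyrun (b := c :: t) (by simp) (hk rfl) ('.' :: l')
              (by rw [pvSpanKey_stop (Or.inr rfl)])]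
            rw [pvSpanKey_stop (Or.inr rfl)]
            simp [pvParseA_dot]
        · have hstep : pvStepB (comps, buf, false) ch = (comps, buf ++ [ch], false) := by
            simp [pvStepB, hbr, hdot]
          rw [hstep]
          have heq : (buf ++ [ch]) ++ l' = buf ++ ch :: l' := by simp
          rw [ih _ _ false
            (by intro _ c hc
                rcases List.mem_append.mp hc with hmm | hmm
                · exact hk rfl c hmm
                · simp at hmm; subst hmm; exact ⟨fun hf => hbr hf, fun hf => hdot hf⟩)
            (by intro hf; cases hf)
            (by rw [heq]; exact hp)]
          rw [heq]

-- ===== VERDICT (by name: the statement is the Claim_ definition above) =====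
theorem parse_jsonpath_components_py_spec : Claim_equal_parse_jsonpath_components_py := by
  intro path _ hpre
  unfold Spec_parse_jsonpath_components_py
  unfold parse_jsonpath_components_py parse_jsonpath_components_py_alt
  have h := pvMain path.toList [] [] false (by intro _ c hc; simp at hc) (by intro h; cases h)
    (by simpa using pvPre_noOpen hpre)
  simpa using h.symm
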